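-- pv_equiv track=rewrite | github.com/jessicahojh/python_practice | code_challenges/code_challenges.py | switch_vowels
-- ===== SOURCE A (Python) =====
-- def switch_vowels(string):
--
--     vowels = 'aeiou'
--     make_lst = []
--
--     for letter in string:
--         make_lst.append(letter)
--
--     i = 0
--     j = len(string) - 1
--
--     while i < j:
--
--         if make_lst[i] not in vowels:
--             i = i + 1
--             continue
--
--         if make_lst[j] not in vowels:
--             j = j - 1
--             continue
--
--         # if make_lst[i] in vowels and make_lst[j] in vowels:
--         make_lst[i], make_lst[j] = make_lst[j], make_lst[i]
--         i = i + 1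
--         j = j - 1
--
--     return ''.join(make_lst)
-- ===== SOURCE B (Python) =====
-- def switch_vowels(string):
--     vowels = 'aeiou'
--     rv = iter([c for c in string if c in vowels][::-1])
--     return ''.join(next(rv) if c in vowels else c for c in string)
-- ===== Notes on version B (the rewrite author's own statement) =====
-- stated objective: simpler
-- what changed: A's in-place two-pointer while loop that swaps vowel pairs from both ends is replaced by a gather-then-fill pass: collect the vowels, reverse that list, and rebuild the string in one forward sweep taking the next reversed vowel at each vowel position.
import Mathlib
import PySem

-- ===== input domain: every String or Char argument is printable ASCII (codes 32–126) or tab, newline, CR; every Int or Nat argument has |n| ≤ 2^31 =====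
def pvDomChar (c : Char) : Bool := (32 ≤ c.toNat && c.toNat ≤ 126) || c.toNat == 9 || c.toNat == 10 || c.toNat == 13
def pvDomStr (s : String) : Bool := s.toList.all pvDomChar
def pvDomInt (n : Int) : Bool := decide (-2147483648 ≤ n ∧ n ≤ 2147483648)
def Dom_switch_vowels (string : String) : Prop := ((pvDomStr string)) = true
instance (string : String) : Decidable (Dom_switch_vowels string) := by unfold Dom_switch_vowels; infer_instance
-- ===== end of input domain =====

-- B replaces A's two-pointer in-place swapping with a gather-then-fill pass
-- (collect the vowels, reverse them, re-insert in one forward sweep); objective: simpler.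


-- ===== PORT A =====

-- `c in 'aeiou'` (single char membership in the vowel string)
def pvIsVowel (c : Char) : Bool := ['a', 'e', 'i', 'o', 'u'].contains c

-- the `while i < j` loop of A; indices i, j are always in range when the loop is
-- entered (0 ≤ i < j ≤ len-1), so the total forms pyGetD/pySetD are exact here
def switchLoop (l : List Char) (i j : Int) : List Char :=
  if h : i < j then
    if pvIsVowel (PySem.List.pyGetD l i ' ') = false then
      switchLoop l (i + 1) j
    else if pvIsVowel (PySem.List.pyGetD l j ' ') = false then
      switchLoop l i (j - 1)
    else
      -- make_lst[i], make_lst[j] = make_lst[j], make_lst[i]  (RHS read first)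
      switchLoop
        (PySem.List.pySetD (PySem.List.pySetD l i (PySem.List.pyGetD l j ' '))
          j (PySem.List.pyGetD l i ' '))
        (i + 1) (j - 1)
  else l
termination_by (j - i).toNat
decreasing_by all_goals omega

def switch_vowels (string : String) : String :=
  -- for letter in string: make_lst.append(letter)
  let make_lst := string.toList.foldl (fun acc c => acc ++ [c]) []
  String.ofList (switchLoop make_lst 0 (PySem.Str.len string - 1))

-- ===== PORT B =====

-- the join-generator: for each char take the next reversed vowel if it is a vowel,
-- else the char itself; `rv.headD c` ports next(rv), never at its default since the
-- iterator holds exactly as many vowels as the string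
def fillVowels : List Char → List Char → List Char
  | [], _ => []
  | c :: cs, rv =>
    if pvIsVowel c then rv.headD c :: fillVowels cs rv.tail
    else c :: fillVowels cs rv

def switch_vowels_alt (string : String) : String :=
  let rv := (string.toList.filter (fun c => pvIsVowel c)).reverse
  String.ofList (fillVowels string.toList rv)

-- ===== PRECONDITION & SPEC =====
def Spec_switch_vowels (string : String) (out : String) : Prop := out = switch_vowels_alt string
instance (string : String) (out : String) : Decidable (Spec_switch_vowels string out) := by unfold Spec_switch_vowels; infer_instance

-- ===== CLAIM (what is proved, stated in full; the proofs are below) =====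
def Claim_equal_switch_vowels : Prop := ∀ (string : String), Dom_switch_vowels string → Spec_switch_vowels string (switch_vowels string)

-- ===== LEMMAS AND PROOFS =====

-- appending a non-vowel on the right commutes with the fill
lemma fillVowels_append_nonvowel (xs : List Char) (rv : List Char) (b : Char)
    (hb : pvIsVowel b = false) :
    fillVowels (xs ++ [b]) rv = fillVowels xs rv ++ [b] := by
  induction xs generalizing rv with
  | nil => simp [fillVowels, hb]
  | cons c cs ih => by_cases hc : pvIsVowel c <;> simp [fillVowels, hc, ih]

-- when the iterator holds exactly the vowels of xs plus one extra element a,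
-- a trailing vowel b consumes exactly that extra a
lemma fillVowels_append_vowel (xs : List Char) (rv : List Char) (a b : Char)
    (hb : pvIsVowel b = true)
    (hlen : rv.length = (xs.filter (fun c => pvIsVowel c)).length) :
    fillVowels (xs ++ [b]) (rv ++ [a]) = fillVowels xs rv ++ [a] := by
  induction xs generalizing rv with
  | nil =>
    have : rv = [] := by
      cases rv with
      | nil => rfl
      | cons v t => simp at hlen
    subst this
    simp [fillVowels, hb]
  | cons c cs ih =>
    by_cases hc : pvIsVowel c
    · cases rv with
      | nil => simp [hc] at hlen
      | cons v t =>
        simp [fillVowels, hc]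
        exact ih t (by simpa [hc] using hlen)
    · simp [fillVowels, hc]
      exact ih rv (by simpa [hc] using hlen)

-- reading / writing the element just past a known prefix
lemma getD_append_cons (p r : List Char) (a d : Char) :
    (p ++ a :: r).getD p.length d = a := by
  simp [List.getD]

lemma set_append_cons (p r : List Char) (a v : Char) :
    (p ++ a :: r).set p.length v = p ++ v :: r := by
  induction p with
  | nil => simp
  | cons x xs ih => simp [ih]

-- MAIN INVARIANT: on the list p ++ m ++ s with the two pointers framing m,
-- A's loop reverses the vowel subsequence of m in place, i.e. produces
-- exactly B's gather-then-fill result on m.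
lemma switchLoop_eq_fill (n : Nat) :
    ∀ p m s : List Char, m.length = n →
      switchLoop (p ++ m ++ s) (p.length : Int)
        ((p.length : Int) + (m.length : Int) - 1)
      = p ++ fillVowels m ((m.filter (fun c => pvIsVowel c)).reverse) ++ s := by
  induction n using Nat.strong_induction_on with
  | _ n ih =>
    intro p m s hn
    by_cases hsmall : m.length ≤ 1
    · -- loop guard fails; m has 0 or 1 elements and the fill fixes them
      rw [switchLoop]
      rw [dif_neg (by omega)]
      match m, hsmall with
      | [], _ => simp [fillVowels]
      | [c], _ =>
        by_cases hc : pvIsVowel c <;> simp [fillVowels, hc]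
    · -- m = a :: (mid ++ [b]) with at least two elements
      have hsmall2 : 2 ≤ m.length := by omega
      obtain ⟨a, t, rfl⟩ : ∃ a t, m = a :: t := by
        cases m with
        | nil => simp at hsmall2
        | cons a t => exact ⟨a, t, rfl⟩
      obtain ⟨mid, b, rfl⟩ : ∃ mid b, t = mid ++ [b] := by
        rcases t.eq_nil_or_concat with h0 | ⟨mid, b, hmb⟩
        · subst h0; simp at hsmall2
        · exact ⟨mid, b, by rw [hmb, List.concat_eq_append]⟩
      have hi : PySem.List.pyGetD (p ++ (a :: (mid ++ [b])) ++ s) (p.length : Int) ' ' = a := by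
        rw [PySem.List.pyGetD_natCast]
        have e : p ++ (a :: (mid ++ [b])) ++ s = p ++ a :: (mid ++ [b] ++ s) := by simp
        rw [e, getD_append_cons]
      have hjcast : ((p.length : Int) + ((a :: (mid ++ [b])).length : Int) - 1)
          = (((p ++ a :: mid).length : Nat) : Int) := by
        simp only [List.length_append, List.length_cons, List.length_nil]; push_cast; omega
      have hj : PySem.List.pyGetD (p ++ (a :: (mid ++ [b])) ++ s)
          ((p.length : Int) + ((a :: (mid ++ [b])).length : Int) - 1) ' ' = b := by
        rw [hjcast, PySem.List.pyGetD_natCast]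
        have e : p ++ (a :: (mid ++ [b])) ++ s = (p ++ a :: mid) ++ b :: s := by simp
        rw [e, getD_append_cons]
      rw [switchLoop]
      rw [dif_pos (by simp only [List.length_append, List.length_cons, List.length_nil];
                      push_cast; omega)]
      by_cases ha : pvIsVowel a
      · by_cases hb : pvIsVowel b
        · -- both vowels: swap, shrink both sides
          rw [if_neg (by rw [hi]; simp [ha]), if_neg (by rw [hj]; simp [hb])]
          rw [hi, hj, hjcast]
          simp only [PySem.List.pySetD_natCast]
          have h1 : (p ++ (a :: (mid ++ [b])) ++ s).set p.length b
              = (p ++ b :: mid) ++ b :: s := by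
            have e : p ++ (a :: (mid ++ [b])) ++ s = p ++ a :: (mid ++ b :: s) := by simp
            rw [e, set_append_cons]; simp
          rw [h1]
          have hlen2 : (p ++ a :: mid).length = (p ++ b :: mid).length := by simp
          rw [hlen2, set_append_cons]
          have e2 : (p ++ b :: mid) ++ a :: s = (p ++ [b]) ++ mid ++ (a :: s) := by simp
          have e3 : ((p.length : Int) + 1) = (((p ++ [b]).length : Nat) : Int) := by
            simp only [List.length_append, List.length_cons, List.length_nil]; push_cast; omega
          have e4 : ((((p ++ b :: mid).length : Nat) : Int) - 1)
              = (((p ++ [b]).length : Nat) : Int) + ((mid.length : Nat) : Int) - 1 := by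
            simp only [List.length_append, List.length_cons, List.length_nil]; push_cast; omega
          have hlt : mid.length < n := by
            rw [← hn]; simp only [List.length_append, List.length_cons, List.length_nil]; omega
          rw [e2, e3, e4, ih mid.length hlt (p ++ [b]) mid (a :: s) rfl]
          have hfill : fillVowels (a :: (mid ++ [b]))
              (((a :: (mid ++ [b])).filter (fun c => pvIsVowel c)).reverse)
              = b :: (fillVowels mid ((mid.filter (fun c => pvIsVowel c)).reverse) ++ [a]) := by
            have hf : (a :: (mid ++ [b])).filter (fun c => pvIsVowel c)
                = a :: ((mid.filter (fun c => pvIsVowel c)) ++ [b]) := by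
              simp [List.filter_append, ha, hb]
            rw [hf]
            have e : (a :: ((mid.filter (fun c => pvIsVowel c)) ++ [b])).reverse
                = b :: ((mid.filter (fun c => pvIsVowel c)).reverse ++ [a]) := by simp
            rw [e]
            simp only [fillVowels, ha, if_pos, List.headD, List.tail]
            rw [fillVowels_append_vowel mid _ a b hb (by simp)]
          rw [hfill]; simp
        · -- right end not a vowel: j moves left
          rw [if_neg (by rw [hi]; simp [ha]), if_pos (by rw [hj]; simp [hb])]
          have e1 : p ++ (a :: (mid ++ [b])) ++ s = p ++ (a :: mid) ++ (b :: s) := by simp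
          have e2 : ((p.length : Int) + ((a :: (mid ++ [b])).length : Int) - 1 - 1)
              = ((p.length : Int) + (((a :: mid).length : Nat) : Int) - 1) := by
            simp only [List.length_append, List.length_cons, List.length_nil]; push_cast; omega
          have hlt : (a :: mid).length < n := by
            rw [← hn]; simp only [List.length_append, List.length_cons, List.length_nil]; omega
          rw [e1, e2, ih (a :: mid).length hlt p (a :: mid) (b :: s) rfl]
          have hf : (a :: (mid ++ [b])).filter (fun c => pvIsVowel c)
              = (a :: mid).filter (fun c => pvIsVowel c) := by
            simp [ha, hb]
          have e5 : (a :: (mid ++ [b])) = (a :: mid) ++ [b] := by simp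
          rw [hf, e5, fillVowels_append_nonvowel (a :: mid) _ b (by simp [hb])]
          simp
      · -- left end not a vowel: i moves right
        rw [if_pos (by rw [hi]; simp [ha])]
        have e1 : p ++ (a :: (mid ++ [b])) ++ s = (p ++ [a]) ++ (mid ++ [b]) ++ s := by simp
        have e2 : ((p.length : Int) + 1) = (((p ++ [a]).length : Nat) : Int) := by
          simp only [List.length_append, List.length_cons, List.length_nil]; push_cast; omega
        have e3 : ((p.length : Int) + ((a :: (mid ++ [b])).length : Int) - 1)
            = (((p ++ [a]).length : Nat) : Int) + (((mid ++ [b]).length : Nat) : Int) - 1 := by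
          simp only [List.length_append, List.length_cons, List.length_nil]; push_cast; omega
        have hlt : (mid ++ [b]).length < n := by
          rw [← hn]; simp only [List.length_append, List.length_cons, List.length_nil]; omega
        rw [e1, e2, e3, ih (mid ++ [b]).length hlt (p ++ [a]) (mid ++ [b]) s rfl]
        have hf : (a :: (mid ++ [b])).filter (fun c => pvIsVowel c)
            = (mid ++ [b]).filter (fun c => pvIsVowel c) := by
          simp [ha]
        rw [hf]
        have e6 : fillVowels (a :: (mid ++ [b]))
            (((mid ++ [b]).filter (fun c => pvIsVowel c)).reverse)
            = a :: fillVowels (mid ++ [b])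
              (((mid ++ [b]).filter (fun c => pvIsVowel c)).reverse) := by
          simp [fillVowels, ha]
        rw [e6]; simp

-- ===== VERDICT (by name: the statement is the Claim_ definition above) =====
theorem switch_vowels_spec : Claim_equal_switch_vowels := by
  unfold Claim_equal_switch_vowels
  intro string _
  unfold Spec_switch_vowels switch_vowels switch_vowels_alt
  have key := switchLoop_eq_fill string.toList.length [] string.toList [] rfl
  simp only [List.nil_append, List.append_nil, List.length_nil, Nat.cast_zero, zero_add] at key
  simp only [PySem.List.foldl_append_singleton, PySem.Str.len_eq, List.nil_append]
  rw [key]
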